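-- pv_equiv track=rewrite | github.com/ValveSoftware/steamlink-sdk | external/qt-everywhere-opensource-src-5.4.1/qtwebengine/src/3rdparty/chromium/mojo/public/tools/bindings/pylib/mojom/parse/translate.py | _MapKind
-- ===== SOURCE A (Python) =====
-- def _MapKind(kind):
--   map_to_kind = { 'bool': 'b',
--                   'int8': 'i8',
--                   'int16': 'i16',
--                   'int32': 'i32',
--                   'int64': 'i64',
--                   'uint8': 'u8',
--                   'uint16': 'u16',
--                   'uint32': 'u32',
--                   'uint64': 'u64',
--                   'float': 'f',
--                   'double': 'd',
--                   'string': 's',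
--                   'handle': 'h',
--                   'handle<data_pipe_consumer>': 'h:d:c',
--                   'handle<data_pipe_producer>': 'h:d:p',
--                   'handle<message_pipe>': 'h:m',
--                   'handle<shared_buffer>': 'h:s'}
--   if kind.endswith('[]'):
--     return 'a:' + _MapKind(kind[0:len(kind)-2])
--   if kind.endswith('&'):
--     return 'r:' + _MapKind(kind[0:len(kind)-1])
--   if kind in map_to_kind:
--     return map_to_kind[kind]
--   return 'x:' + kind
-- ===== SOURCE B (Python) =====
-- _MAP_TO_KIND = { 'bool': 'b',
--                  'int8': 'i8',
--                  'int16': 'i16',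
--                  'int32': 'i32',
--                  'int64': 'i64',
--                  'uint8': 'u8',
--                  'uint16': 'u16',
--                  'uint32': 'u32',
--                  'uint64': 'u64',
--                  'float': 'f',
--                  'double': 'd',
--                  'string': 's',
--                  'handle': 'h',
--                  'handle<data_pipe_consumer>': 'h:d:c',
--                  'handle<data_pipe_producer>': 'h:d:p',
--                  'handle<message_pipe>': 'h:m',
--                  'handle<shared_buffer>': 'h:s'}
--
-- def _MapKind(kind):
--   prefix = ''
--   while True:
--     if kind.endswith('[]'):
--       prefix += 'a:'
--       kind = kind[:-2]
--     elif kind.endswith('&'):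
--       prefix += 'r:'
--       kind = kind[:-1]
--     else:
--       break
--   short = _MAP_TO_KIND.get(kind)
--   return prefix + (short if short is not None else 'x:' + kind)
-- ===== Notes on version B (the rewrite author's own statement) =====
-- stated objective: alternative
-- what changed: Replaced A's self-recursion (each array/reference suffix level re-enters _MapKind and prepends its code on return) by an iterative loop that accumulates the prefix codes front-to-back into a string, then does a single dict .get lookup and one final concatenation.
import Mathlib
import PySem

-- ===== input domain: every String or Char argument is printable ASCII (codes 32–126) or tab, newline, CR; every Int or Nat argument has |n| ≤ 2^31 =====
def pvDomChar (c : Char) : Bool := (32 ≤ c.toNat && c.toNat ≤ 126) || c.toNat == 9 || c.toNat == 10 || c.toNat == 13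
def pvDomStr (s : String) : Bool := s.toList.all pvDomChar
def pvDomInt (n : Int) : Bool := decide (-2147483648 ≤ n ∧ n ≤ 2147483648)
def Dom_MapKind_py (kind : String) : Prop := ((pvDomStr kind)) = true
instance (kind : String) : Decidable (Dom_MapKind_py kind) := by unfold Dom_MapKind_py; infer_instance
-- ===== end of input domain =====

-- B changes the decomposition only: same values, iterative accumulation instead of self-recursion.

-- ===== PORT A =====
-- A's dict literal (built fresh on every Python call; literal data, hoisted as a constant)
def mapToKindA : PySem.Dict String String := PySem.Dict.ofList
  [ ("bool", "b"), ("int8", "i8"), ("int16", "i16"), ("int32", "i32"), ("int64", "i64"),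
    ("uint8", "u8"), ("uint16", "u16"), ("uint32", "u32"), ("uint64", "u64"),
    ("float", "f"), ("double", "d"), ("string", "s"), ("handle", "h"),
    ("handle<data_pipe_consumer>", "h:d:c"), ("handle<data_pipe_producer>", "h:d:p"),
    ("handle<message_pipe>", "h:m"), ("handle<shared_buffer>", "h:s") ]

-- termination facts for the two ports (cited in decreasing_by)
theorem pvSliceLt2 (cs : List Char) (h : 2 ≤ cs.length) :
    (PySem.List.slice cs (some 0) (some ((cs.length : Int) - 2))).length < cs.length := by
  rw [PySem.List.slice_toNat cs (by omega) (by omega)]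
  simp; omega

theorem pvSliceLt1 (cs : List Char) (h : 1 ≤ cs.length) :
    (PySem.List.slice cs (some 0) (some ((cs.length : Int) - 1))).length < cs.length := by
  rw [PySem.List.slice_toNat cs (by omega) (by omega)]
  simp; omega

theorem pvEndsLen (cs p : List Char) (h : PySem.Chars.endswith cs p = true) :
    p.length ≤ cs.length :=
  ((PySem.Chars.endswith_iff cs p).1 h).length_le

-- A's recursion, transliterated on List Char ('a:' + _MapKind(kind[0:len(kind)-2]), …)
def mapKindACh (cs : List Char) : List Char :=
  if h1 : PySem.Chars.endswith cs ['[', ']'] then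
    'a' :: ':' :: mapKindACh (PySem.List.slice cs (some 0) (some ((cs.length : Int) - 2)))
  else if h2 : PySem.Chars.endswith cs ['&'] then
    'r' :: ':' :: mapKindACh (PySem.List.slice cs (some 0) (some ((cs.length : Int) - 1)))
  else if (mapToKindA.get? (String.mk cs)).isSome then
    ((mapToKindA.get? (String.mk cs)).getD "").toList
  else
    'x' :: ':' :: cs
termination_by cs.length
decreasing_by
  · exact pvSliceLt2 cs (pvEndsLen cs _ h1)
  · exact pvSliceLt1 cs (pvEndsLen cs _ h2)

def MapKind_py (kind : String) : String := String.mk (mapKindACh kind.toList)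

-- ===== PORT B =====
-- B's module-level pairs (same literal data, looked up once with .get)
def mapPairsB : List (String × String) :=
  [ ("bool", "b"), ("int8", "i8"), ("int16", "i16"), ("int32", "i32"), ("int64", "i64"),
    ("uint8", "u8"), ("uint16", "u16"), ("uint32", "u32"), ("uint64", "u64"),
    ("float", "f"), ("double", "d"), ("string", "s"), ("handle", "h"),
    ("handle<data_pipe_consumer>", "h:d:c"), ("handle<data_pipe_producer>", "h:d:p"),
    ("handle<message_pipe>", "h:m"), ("handle<shared_buffer>", "h:s") ]

-- B's while-loop: accumulate the prefix, shrink kind (kind[:-2] / kind[:-1]), then one lookup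
def mapLoopB (acc : List Char) (cs : List Char) : List Char :=
  if h1 : PySem.Chars.endswith cs ['[', ']'] then
    mapLoopB (acc ++ ['a', ':']) (PySem.List.slice cs none (some (-2)))
  else if h2 : PySem.Chars.endswith cs ['&'] then
    mapLoopB (acc ++ ['r', ':']) (PySem.List.slice cs none (some (-1)))
  else
    acc ++ (match List.lookup (String.mk cs) mapPairsB with
            | some short => short.toList
            | none => 'x' :: ':' :: cs)
termination_by cs.length
decreasing_by
  · rw [PySem.List.slice_to_neg_ofNat cs 2 (by omega)]
    have := pvEndsLen cs _ h1
    simp at this; simp; omega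
  · rw [PySem.List.slice_to_neg_one]
    have := pvEndsLen cs _ h2
    simp at this; simp [List.length_dropLast]; omega

def MapKind_py_alt (kind : String) : String := String.mk (mapLoopB [] kind.toList)

-- ===== PRECONDITION & SPEC =====
def Spec_MapKind_py (kind : String) (out : String) : Prop := out = MapKind_py_alt kind
instance (kind : String) (out : String) : Decidable (Spec_MapKind_py kind out) := by unfold Spec_MapKind_py; infer_instance

-- ===== CLAIM (what is proved, stated in full; the proofs are below) =====
def Claim_equal_MapKind_py : Prop := ∀ (kind : String), Dom_MapKind_py kind → Spec_MapKind_py kind (MapKind_py kind)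

-- ===== LEMMAS AND PROOFS =====

-- literal-dict get? coincides with assoc-list lookup (first match, same key order)
theorem pvDictLookup (l : List (String × String)) (s : String) :
    (PySem.Dict.mk l).get? s = List.lookup s l := by
  induction l with
  | nil => rfl
  | cons p t ih =>
    cases p with
    | mk k v =>
      rw [List.lookup_cons]
      simp only [PySem.Dict.get?, List.find?_cons] at ih ⊢
      have hb : (k == s) = (s == k) := BEq.comm
      cases h : s == k <;> rw [hb, h] <;> simp [ih]

-- A's dict lookup and B's lookup agree on every key (same pairs, same order)
theorem pvLookupEq (s : String) :
    mapToKindA.get? s = List.lookup s mapPairsB := by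
  have h : mapToKindA = PySem.Dict.mk mapPairsB := by decide
  rw [h]
  exact pvDictLookup mapPairsB s

-- the loop accumulates exactly what A's recursion prepends
theorem pvLoopEq (n : Nat) (cs : List Char) (hn : cs.length ≤ n) (acc : List Char) :
    mapLoopB acc cs = acc ++ mapKindACh cs := by
  induction n generalizing cs acc with
  | zero =>
    rw [mapLoopB, mapKindACh]
    have h1 : PySem.Chars.endswith cs ['[', ']'] = false := by
      cases h : PySem.Chars.endswith cs ['[', ']'] with
      | true => have := pvEndsLen cs _ h; simp at this; omega
      | false => rfl
    have h2 : PySem.Chars.endswith cs ['&'] = false := by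
      cases h : PySem.Chars.endswith cs ['&'] with
      | true => have := pvEndsLen cs _ h; simp at this; omega
      | false => rfl
    have hg := pvLookupEq (String.mk cs)
    cases hL : List.lookup (String.mk cs) mapPairsB <;> simp [h1, h2, hg, hL]
  | succ n ih =>
    rw [mapLoopB, mapKindACh]
    by_cases h1 : PySem.Chars.endswith cs ['[', ']'] = true
    · have hl : 2 ≤ cs.length := pvEndsLen cs _ h1
      have hs : PySem.List.slice cs none (some (-2)) =
          PySem.List.slice cs (some 0) (some ((cs.length : Int) - 2)) := by
        rw [PySem.List.slice_to_neg_ofNat cs 2 (by omega),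
            PySem.List.slice_toNat cs (by omega) (by omega)]
        simp; omega
      have hlen : (PySem.List.slice cs (some 0) (some ((cs.length : Int) - 2))).length ≤ n := by
        have := pvSliceLt2 cs hl; omega
      simp only [h1, dif_pos, hs]
      rw [ih _ hlen]
      simp
    · by_cases h2 : PySem.Chars.endswith cs ['&'] = true
      · have hl : 1 ≤ cs.length := pvEndsLen cs _ h2
        have hs : PySem.List.slice cs none (some (-1)) =
            PySem.List.slice cs (some 0) (some ((cs.length : Int) - 1)) := by
          rw [PySem.List.slice_to_neg_one,
              PySem.List.slice_toNat cs (by omega) (by omega)]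
          simp [List.dropLast_eq_take]
        have hlen : (PySem.List.slice cs (some 0) (some ((cs.length : Int) - 1))).length ≤ n := by
          have := pvSliceLt1 cs hl; omega
        simp only [h1, h2, dif_pos]
        rw [hs, ih _ hlen]
        simp
      · have hg := pvLookupEq (String.mk cs)
        cases hL : List.lookup (String.mk cs) mapPairsB <;> simp [h1, h2, hg, hL]

-- ===== VERDICT (by name: the statement is the Claim_ definition above) =====
theorem MapKind_py_spec : Claim_equal_MapKind_py := by
  intro kind _
  unfold Spec_MapKind_py MapKind_py MapKind_py_alt
  rw [pvLoopEq kind.toList.length kind.toList le_rfl []]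
  simp
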